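-- pv_equiv track=rewrite | github.com/black-yt/RCB | data/runs/Life_002_20260402_024836/workspace/code/complex_alignment_analysis.py | ungapped_seed_pairs
-- ===== SOURCE A (Python) =====
-- from typing import Dict, Iterable, List, Sequence, Tuple
--
-- def ungapped_seed_pairs(n_query: int, n_target: int, min_overlap: int = 25) -> List[Tuple[List[int], List[int], str]]:
--     seeds: List[Tuple[List[int], List[int], str]] = []
--     for shift in range(-(n_query - min_overlap), n_target - min_overlap + 1):
--         q_idx: List[int] = []
--         t_idx: List[int] = []
--         for i in range(n_query):
--             j = i + shift
--             if 0 <= j < n_target: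
--                 q_idx.append(i)
--                 t_idx.append(j)
--         if len(q_idx) >= min_overlap:
--             seeds.append((q_idx, t_idx, f"ungapped_shift_{shift}"))
--     return seeds
-- ===== SOURCE B (Python) =====
-- from typing import List, Tuple
--
-- def ungapped_seed_pairs(n_query: int, n_target: int, min_overlap: int = 25) -> List[Tuple[List[int], List[int], str]]:
--     # Per shift, compute the overlap window arithmetically instead of scanning every query position.
--     seeds: List[Tuple[List[int], List[int], str]] = []
--     for shift in range(-(n_query - min_overlap), n_target - min_overlap + 1):
--         lo = max(0, -shift)
--         hi = min(n_query, n_target - shift)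
--         if max(hi - lo, 0) >= min_overlap:
--             seeds.append((list(range(lo, hi)),
--                           list(range(lo + shift, hi + shift)),
--                           f"ungapped_shift_{shift}"))
--     return seeds
-- ===== Notes on version B (the rewrite author's own statement) =====
-- stated objective: alternative
-- what changed: Replaced the inner scan over all n_query positions per shift by an arithmetic computation of the overlap window [max(0,-shift), min(n_query, n_target-shift)) and built the index lists directly with range; the output itself is quadratic in size, so total cost is dominated by building it.
import Mathlib
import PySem

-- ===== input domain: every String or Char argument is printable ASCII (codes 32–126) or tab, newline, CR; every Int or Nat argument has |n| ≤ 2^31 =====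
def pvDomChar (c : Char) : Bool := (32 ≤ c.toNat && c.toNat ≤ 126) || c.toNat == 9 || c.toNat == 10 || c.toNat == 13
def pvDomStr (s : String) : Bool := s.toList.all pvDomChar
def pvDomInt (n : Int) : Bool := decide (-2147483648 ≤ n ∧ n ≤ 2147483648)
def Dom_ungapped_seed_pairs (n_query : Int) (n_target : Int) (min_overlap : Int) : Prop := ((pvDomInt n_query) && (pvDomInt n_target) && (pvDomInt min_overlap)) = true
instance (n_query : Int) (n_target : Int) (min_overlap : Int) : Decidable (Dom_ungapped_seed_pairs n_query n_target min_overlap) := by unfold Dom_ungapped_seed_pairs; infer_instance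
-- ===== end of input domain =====

-- B replaces A's per-shift scan over all query positions by an arithmetic overlap window built with range (alternative algorithm).

-- ===== PORT A =====
def ungapped_seed_pairs (n_query : Int) (n_target : Int) (min_overlap : Int) : List (List Int × List Int × String) :=
  (PySem.List.pyRange (-(n_query - min_overlap)) (n_target - min_overlap + 1) 1).foldl
    (fun seeds shift =>
      let p := (PySem.List.pyRange 0 n_query 1).foldl
        (fun (st : List Int × List Int) i =>
          let j := i + shift
          if 0 ≤ j ∧ j < n_target then (st.1 ++ [i], st.2 ++ [j]) else st)
        ([], [])
      if (p.1.length : Int) ≥ min_overlap then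
        seeds ++ [(p.1, p.2, "ungapped_shift_" ++ PySem.Int.toStr shift)]
      else seeds)
    []

-- ===== PORT B =====
def ungapped_seed_pairs_alt (n_query : Int) (n_target : Int) (min_overlap : Int) : List (List Int × List Int × String) :=
  (PySem.List.pyRange (-(n_query - min_overlap)) (n_target - min_overlap + 1) 1).foldl
    (fun seeds shift =>
      let lo := max 0 (-shift)
      let hi := min n_query (n_target - shift)
      if max (hi - lo) 0 ≥ min_overlap then
        seeds ++ [(PySem.List.pyRange lo hi 1,
                   PySem.List.pyRange (lo + shift) (hi + shift) 1,
                   "ungapped_shift_" ++ PySem.Int.toStr shift)]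
      else seeds)
    []

-- ===== PRECONDITION & SPEC =====
def Spec_ungapped_seed_pairs (n_query : Int) (n_target : Int) (min_overlap : Int) (out : List (List Int × List Int × String)) : Prop := out = ungapped_seed_pairs_alt n_query n_target min_overlap
instance (n_query : Int) (n_target : Int) (min_overlap : Int) (out : List (List Int × List Int × String)) : Decidable (Spec_ungapped_seed_pairs n_query n_target min_overlap out) := by unfold Spec_ungapped_seed_pairs; infer_instance

-- ===== CLAIM (what is proved, stated in full; the proofs are below) =====
def Claim_equal_ungapped_seed_pairs : Prop := ∀ (n_query : Int) (n_target : Int) (min_overlap : Int), Dom_ungapped_seed_pairs n_query n_target min_overlap → Spec_ungapped_seed_pairs n_query n_target min_overlap (ungapped_seed_pairs n_query n_target min_overlap)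

-- ===== LEMMAS AND PROOFS =====

-- Filtering an increasing unit range by an interval test yields the intersected range.
theorem pv_filter_pyRange_interval (n : Nat) : ∀ (a b c d : Int), (b - a).toNat = n →
    (PySem.List.pyRange a b 1).filter (fun i => decide (c ≤ i ∧ i < d)) =
      PySem.List.pyRange (max a c) (min b d) 1 := by
  induction n with
  | zero =>
      intro a b c d h
      rw [PySem.List.pyRange_one_eq_nil (by omega), PySem.List.pyRange_one_eq_nil (by omega)]
      rfl
  | succ n ih =>
      intro a b c d h
      rw [PySem.List.pyRange_one_cons (by omega)]
      by_cases hp : c ≤ a ∧ a < d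
      · rw [List.filter_cons_of_pos (by simpa using hp), ih (a + 1) b c d (by omega)]
        have h1 : max (a + 1) c = a + 1 := by omega
        have h2 : max a c = a := by omega
        rw [h1, h2, ← PySem.List.pyRange_one_cons (show a < min b d by omega)]
      · rw [List.filter_cons_of_neg (by simpa using hp), ih (a + 1) b c d (by omega)]
        by_cases hc : a < c
        · have h1 : max (a + 1) c = max a c := by omega
          rw [h1]
        · -- here a ≥ d, so both ranges are empty
          rw [PySem.List.pyRange_one_eq_nil (by omega), PySem.List.pyRange_one_eq_nil (by omega)]

theorem pv_map_add_pyRange (s : Int) (n : Nat) : ∀ (a b : Int), (b - a).toNat = n →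
    (PySem.List.pyRange a b 1).map (fun i => i + s) = PySem.List.pyRange (a + s) (b + s) 1 := by
  induction n with
  | zero =>
      intro a b h
      rw [PySem.List.pyRange_one_eq_nil (by omega), PySem.List.pyRange_one_eq_nil (by omega)]
      rfl
  | succ n ih =>
      intro a b h
      rw [PySem.List.pyRange_one_cons (show a < b by omega)]
      simp only [List.map_cons]
      rw [ih (a + 1) b (by omega)]
      rw [show a + 1 + s = a + s + 1 by ring, ← PySem.List.pyRange_one_cons (show a + s < b + s by omega)]

-- ===== VERDICT (by name: the statement is the Claim_ definition above) =====
theorem ungapped_seed_pairs_spec : Claim_equal_ungapped_seed_pairs := by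
  intro n_query n_target min_overlap _
  unfold Spec_ungapped_seed_pairs ungapped_seed_pairs ungapped_seed_pairs_alt
  apply PySem.List.foldl_congr_mem
  intro seeds shift _
  -- rewrite the inner pair fold into two independent folds, then into filtered ranges
  have hstep : (fun (st : List Int × List Int) (i : Int) =>
        let j := i + shift
        if 0 ≤ j ∧ j < n_target then (st.1 ++ [i], st.2 ++ [j]) else st) =
      (fun (st : List Int × List Int) (i : Int) =>
        ((if 0 ≤ i + shift ∧ i + shift < n_target then st.1 ++ [i] else st.1),
         (if 0 ≤ i + shift ∧ i + shift < n_target then st.2 ++ [i + shift] else st.2))) := by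
    funext st i
    by_cases h : 0 ≤ i + shift ∧ i + shift < n_target <;> simp [h]
  rw [hstep, PySem.List.foldl_prod_mk
        (f := fun acc i => if 0 ≤ i + shift ∧ i + shift < n_target then acc ++ [i] else acc)
        (g := fun acc i => if 0 ≤ i + shift ∧ i + shift < n_target then acc ++ [i + shift] else acc),
      PySem.List.foldl_append_ite_eq_filter, PySem.List.foldl_append_ite]
  simp only [List.nil_append]
  have hiff : ∀ i : Int, (0 ≤ i + shift ∧ i + shift < n_target) ↔ (-shift ≤ i ∧ i < n_target - shift) := by
    intro i; omega
  have hfe : (fun i : Int => decide (0 ≤ i + shift ∧ i + shift < n_target)) =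
      (fun i : Int => decide (-shift ≤ i ∧ i < n_target - shift)) := by
    funext i; simp [hiff i]
  rw [hfe, pv_filter_pyRange_interval ((n_query - 0).toNat) 0 n_query (-shift) (n_target - shift) rfl]
  set lo := max 0 (-shift) with hlo
  set hi := min n_query (n_target - shift) with hhi
  rw [pv_map_add_pyRange shift ((hi - lo).toNat) lo hi rfl]
  rw [PySem.List.length_pyRange_one]
  have hcond : ((hi - lo).toNat : Int) ≥ min_overlap ↔ max (hi - lo) 0 ≥ min_overlap := by omega
  by_cases h : max (hi - lo) 0 ≥ min_overlap
  · rw [if_pos (hcond.mpr h), if_pos h]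
  · rw [if_neg (fun hc => h (hcond.mp hc)), if_neg h]
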